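-- pv_equiv track=rewrite | github.com/alexanderwedlund/isp-keyword-analyzer | src/ui/app.py | get_next_keyword
-- ===== SOURCE A (Python) =====
-- def get_next_keyword(all_keywords, analyzed_keywords, current_keyword):
--     """Get the next keyword to analyze."""
--     if current_keyword is None:
--         for kw in all_keywords:
--             if kw not in analyzed_keywords:
--                 return kw
--         return all_keywords[0] if all_keywords else None
--
--     try:
--         current_index = all_keywords.index(current_keyword)
--     except ValueError:
--         return all_keywords[0] if all_keywords else None
--
--     # Try to find a keyword that hasn't been analyzed yet
--     for i in range(current_index + 1, len(all_keywords)):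
--         if all_keywords[i] not in analyzed_keywords:
--             return all_keywords[i]
--
--     for i in range(0, current_index):
--         if all_keywords[i] not in analyzed_keywords:
--             return all_keywords[i]
--
--     # If all keywords have been analyzed, just move to the next one
--     return all_keywords[(current_index + 1) % len(all_keywords)]
-- ===== SOURCE B (Python) =====
-- def get_next_keyword(all_keywords, analyzed_keywords, current_keyword):
--     """Get the next keyword to analyze: one pass computing the argmin of cyclic distance."""
--     n = len(all_keywords)
--     if current_keyword is None:
--         start, skip = 0, None
--     elif current_keyword in all_keywords:
--         idx = all_keywords.index(current_keyword)
--         start, skip = idx + 1, idx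
--     else:
--         return all_keywords[0] if all_keywords else None
--     best = None
--     for j, kw in enumerate(all_keywords):
--         if j != skip and kw not in analyzed_keywords:
--             d = (j - start) % n
--             if best is None or d < best[0]:
--                 best = (d, kw)
--     if best is not None:
--         return best[1]
--     if current_keyword is None:
--         return all_keywords[0] if all_keywords else None
--     return all_keywords[start % n]
-- ===== Notes on version B (the rewrite author's own statement) =====
-- stated objective: alternative
-- what changed: A scans in cyclic order with two separate index range-loops and returns the first unanalyzed hit; B makes ONE pass over enumerate(all_keywords) in list order, keeping the unanalyzed keyword whose cyclic distance (j - start) % n from the start position is minimal (distances are distinct, so the argmin is exactly A's first cyclic hit), with the same not-found and all-analyzed fallbacks.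
import Mathlib
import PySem

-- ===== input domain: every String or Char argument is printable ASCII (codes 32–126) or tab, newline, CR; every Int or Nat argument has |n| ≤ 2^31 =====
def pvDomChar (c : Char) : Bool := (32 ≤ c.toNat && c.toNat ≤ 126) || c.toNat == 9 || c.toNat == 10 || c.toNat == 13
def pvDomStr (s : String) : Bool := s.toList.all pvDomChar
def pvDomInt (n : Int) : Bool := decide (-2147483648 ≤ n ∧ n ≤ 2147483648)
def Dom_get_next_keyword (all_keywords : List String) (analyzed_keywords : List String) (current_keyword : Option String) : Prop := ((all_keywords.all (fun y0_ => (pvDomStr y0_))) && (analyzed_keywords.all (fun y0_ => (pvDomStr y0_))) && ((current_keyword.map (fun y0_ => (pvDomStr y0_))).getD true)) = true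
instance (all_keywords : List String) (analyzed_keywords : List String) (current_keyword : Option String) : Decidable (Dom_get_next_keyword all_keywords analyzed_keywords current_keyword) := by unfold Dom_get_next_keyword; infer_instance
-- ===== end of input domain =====

-- B replaces A's two cyclic range-scans by ONE pass over enumerate(all_keywords) that keeps
-- the unanalyzed keyword of minimal cyclic distance from the start position (objective: alternative).

-- ===== PORT A =====
-- 'for kw in all_keywords: if kw not in analyzed_keywords: return kw' (value loop of the None branch)
def aValScan (analyzed_keywords : List String) : List String → Option String
  | [] => none
  | kw :: rest => if analyzed_keywords.contains kw then aValScan analyzed_keywords rest else some kw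

-- 'for i in range(a, b): if all_keywords[i] not in analyzed_keywords: return all_keywords[i]'
def aIdxScan (all_keywords analyzed_keywords : List String) : List Int → Option String
  | [] => none
  | i :: rest =>
    match PySem.List.pyGet? all_keywords i with
    | some kw => if analyzed_keywords.contains kw then aIdxScan all_keywords analyzed_keywords rest else some kw
    | none => none  -- IndexError cannot occur: indices come from range(…, len)

def get_next_keyword (all_keywords : List String) (analyzed_keywords : List String) (current_keyword : Option String) : Option String :=
  match current_keyword with
  | none =>
    match aValScan analyzed_keywords all_keywords with
    | some kw => some kw
    | none => match all_keywords with | [] => none | x :: _ => some x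
  | some c =>
    match PySem.List.index? all_keywords c with
    | none => match all_keywords with | [] => none | x :: _ => some x
    | some ci =>
      match aIdxScan all_keywords analyzed_keywords (PySem.List.pyRange ((ci : Int) + 1) (all_keywords.length : Int) 1) with
      | some kw => some kw
      | none =>
        match aIdxScan all_keywords analyzed_keywords (PySem.List.pyRange 0 (ci : Int) 1) with
        | some kw => some kw
        | none => PySem.List.pyGet? all_keywords (PySem.Int.mod ((ci : Int) + 1) (all_keywords.length : Int))

-- ===== PORT B =====
-- loop body: 'if j != skip and kw not in analyzed: d = (j-start) % n; if best is None or d < best[0]: best = (d, kw)'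
def bStep (analyzed : PySem.Set String) (skip : Option Int) (start n : Int)
    (best : Option (Int × String)) (p : Int × String) : Option (Int × String) :=
  if skip ≠ some p.1 ∧ PySem.Set.contains analyzed p.2 = false then
    let d := PySem.Int.mod (p.1 - start) n
    match best with
    | none => some (d, p.2)
    | some b => if d < b.1 then some (d, p.2) else best
  else best

def get_next_keyword_alt (all_keywords : List String) (analyzed_keywords : List String) (current_keyword : Option String) : Option String :=
  let analyzed := PySem.Set.ofList analyzed_keywords
  let n := (all_keywords.length : Int)
  match current_keyword with
  | none =>
    match (PySem.List.enumerate all_keywords 0).foldl (bStep analyzed none 0 n) none with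
    | some b => some b.2
    | none => match all_keywords with | [] => none | x :: _ => some x
  | some c =>
    if all_keywords.contains c then
      let idx := all_keywords.idxOf c
      match (PySem.List.enumerate all_keywords 0).foldl (bStep analyzed (some (idx : Int)) ((idx : Int) + 1) n) none with
      | some b => some b.2
      | none => PySem.List.pyGet? all_keywords (PySem.Int.mod ((idx : Int) + 1) n)
    else
      match all_keywords with | [] => none | x :: _ => some x

-- ===== PRECONDITION & SPEC =====
def Spec_get_next_keyword (all_keywords : List String) (analyzed_keywords : List String) (current_keyword : Option String) (out : Option String) : Prop := out = get_next_keyword_alt all_keywords analyzed_keywords current_keyword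
instance (all_keywords : List String) (analyzed_keywords : List String) (current_keyword : Option String) (out : Option String) : Decidable (Spec_get_next_keyword all_keywords analyzed_keywords current_keyword out) := by unfold Spec_get_next_keyword; infer_instance

-- ===== CLAIM (what is proved, stated in full; the proofs are below) =====
def Claim_equal_get_next_keyword : Prop := ∀ (all_keywords : List String) (analyzed_keywords : List String) (current_keyword : Option String), Dom_get_next_keyword all_keywords analyzed_keywords current_keyword → Spec_get_next_keyword all_keywords analyzed_keywords current_keyword (get_next_keyword all_keywords analyzed_keywords current_keyword)

-- ===== LEMMAS AND PROOFS =====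

-- B's set membership agrees with A's list membership
theorem pv_set_contains (an : List String) (kw : String) :
    PySem.Set.contains (PySem.Set.ofList an) kw = an.contains kw := by
  by_cases h : kw ∈ an <;> simp [PySem.Set.mem_ofList, h]

theorem aValScan_eq_find? (an : List String) (xs : List String) :
    aValScan an xs = xs.find? (fun kw => !(PySem.Set.contains (PySem.Set.ofList an) kw)) := by
  induction xs with
  | nil => rfl
  | cons x rest ih =>
    rw [aValScan, List.find?, pv_set_contains]
    by_cases h : x ∈ an <;> simp [h, ih]

-- A's index loop over range(a, b) is find? over the corresponding sublist
theorem aIdxScan_eq_find? (all an : List String) (a b : Nat) (hb : b ≤ all.length) :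
    aIdxScan all an (PySem.List.pyRange (a : Int) (b : Int) 1)
      = ((all.drop a).take (b - a)).find? (fun kw => !(PySem.Set.contains (PySem.Set.ofList an) kw)) := by
  by_cases hab : b ≤ a
  · rw [PySem.List.pyRange_one_eq_nil (by exact_mod_cast hab)]
    simp [aIdxScan, Nat.sub_eq_zero_of_le hab]
  · replace hab : a < b := by omega
    have ha : a < all.length := lt_of_lt_of_le hab hb
    rw [PySem.List.pyRange_one_cons (by exact_mod_cast hab)]
    have hdrop : all.drop a = all[a] :: all.drop (a + 1) := List.drop_eq_getElem_cons ha
    have hcast : ((a : Int) + 1) = ((a + 1 : Nat) : Int) := by push_cast; ring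
    rw [aIdxScan, PySem.List.pyGet?_natCast, List.getElem?_eq_getElem ha, hcast,
      aIdxScan_eq_find? all an (a + 1) b hb, hdrop]
    have hsub : b - a = (b - (a + 1)) + 1 := by omega
    rw [hsub, List.take_succ_cons, List.find?, pv_set_contains]
    by_cases h : all[a] ∈ an <;> simp [h]
termination_by b - a

-- an element found in 'enumerate xs i' carries an index in [i, i + |xs|)
theorem find?_enumerate_fst_bounds (xs : List String) (i : Int) (q : Int × String → Bool)
    (p : Int × String) (h : (PySem.List.enumerate xs i).find? q = some p) :
    i ≤ p.1 ∧ p.1 < i + xs.length := by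
  have hm := List.mem_of_find?_eq_some h
  rw [PySem.List.mem_enumerate_iff] at hm
  obtain ⟨k, hk, rfl⟩ := hm
  constructor <;> simp
  omega

-- projecting the value out of a find? over an enumeration
theorem find?_enumerate_snd (q : String → Bool) (xs : List String) (i : Int) :
    ((PySem.List.enumerate xs i).find? (fun p => q p.2)).map Prod.snd = xs.find? q := by
  induction xs generalizing i with
  | nil => rfl
  | cons x rest ih =>
    rw [PySem.List.enumerate_cons, List.find?, List.find?]
    by_cases h : q x = true <;> simp [h, ih]

-- the single argmin pass over a segment whose cyclic distances are j + c (affine, increasing)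
theorem fold_lin (s : PySem.Set String) (skip : Option Int) (start n c : Int)
    (xs : List String) (i : Int) (acc : Option (Int × String))
    (Hd : ∀ j : Int, i ≤ j → j < i + xs.length → PySem.Int.mod (j - start) n = j + c ∧ skip ≠ some j) :
    (PySem.List.enumerate xs i).foldl (bStep s skip start n) acc
      = match (PySem.List.enumerate xs i).find? (fun p => !(PySem.Set.contains s p.2)) with
        | none => acc
        | some p =>
          match acc with
          | none => some (p.1 + c, p.2)
          | some b => if p.1 + c < b.1 then some (p.1 + c, p.2) else acc := by
  induction xs generalizing i acc with
  | nil => rfl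
  | cons x rest ih =>
    obtain ⟨hdx, hsx⟩ := Hd i (le_refl i) (by simp)
    have hrest : ∀ j : Int, i + 1 ≤ j → j < (i + 1) + rest.length →
        PySem.Int.mod (j - start) n = j + c ∧ skip ≠ some j := by
      intro j h1 h2
      refine Hd j (by omega) ?_
      simp only [List.length_cons]
      push_cast at h2 ⊢
      omega
    rw [PySem.List.enumerate_cons, List.foldl_cons]
    cases hq : PySem.Set.contains s x with
    | true =>
      have hstep : bStep s skip start n acc (i, x) = acc := by
        have hcond : ¬ (skip ≠ some (i, x).1 ∧ PySem.Set.contains s (i, x).2 = false) := by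
          rintro ⟨-, hc⟩
          rw [hq] at hc
          exact absurd hc (by decide)
        simp only [bStep, if_neg hcond]
      rw [hstep, ih (i + 1) acc hrest, List.find?_cons]
      simp only [hq, Bool.not_true]
    | false =>
      have hstep : bStep s skip start n acc (i, x)
          = match acc with
            | none => some (i + c, x)
            | some b => if i + c < b.1 then some (i + c, x) else acc := by
        have hcond : skip ≠ some (i, x).1 ∧ PySem.Set.contains s (i, x).2 = false := ⟨hsx, hq⟩
        simp only [bStep, if_pos hcond, hdx]
      rw [hstep, ih (i + 1) _ hrest, List.find?_cons]
      simp only [hq, Bool.not_false]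
      have hbig : ∀ p, (PySem.List.enumerate rest (i + 1)).find?
          (fun p => !(PySem.Set.contains s p.2)) = some p → i + 1 ≤ p.1 := fun p hp =>
        (find?_enumerate_fst_bounds rest (i + 1) _ p hp).1
      cases hfr : (PySem.List.enumerate rest (i + 1)).find?
          (fun p => !(PySem.Set.contains s p.2)) with
      | none =>
        cases acc with
        | none => rfl
        | some b => by_cases hlt : i + c < b.1 <;> simp only [if_pos, hlt, if_false]
      | some p =>
        have hpi : i + 1 ≤ p.1 := hbig p hfr
        cases acc with
        | none =>
          have hno : ¬ (p.1 + c < i + c) := by omega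
          simp only [if_neg hno]
        | some b =>
          by_cases hlt : i + c < b.1
          · have hno : ¬ (p.1 + c < i + c) := by omega
            simp only [if_pos hlt, if_neg hno]
          · have hno : ¬ (p.1 + c < b.1) := by omega
            simp only [if_neg hlt, if_neg hno]

theorem get_next_keyword_spec' (all an : List String) (cur : Option String) :
    get_next_keyword all an cur = get_next_keyword_alt all an cur := by
  cases cur with
  | none =>
    have Hd : ∀ j : Int, 0 ≤ j → j < 0 + (all.length : Int) →
        PySem.Int.mod (j - 0) (all.length : Int) = j + 0 ∧ (none : Option Int) ≠ some j := by
      intro j h1 h2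
      refine ⟨?_, by simp⟩
      have hn : 0 < (all.length : Int) := by omega
      rw [PySem.Int.mod_eq_emod_of_pos hn, Int.emod_eq_of_lt (by omega) (by omega)]
      ring
    simp only [get_next_keyword, get_next_keyword_alt]
    rw [fold_lin (PySem.Set.ofList an) none 0 (all.length : Int) 0 all 0 none Hd,
      aValScan_eq_find? an all,
      ← find?_enumerate_snd (fun kw => !(PySem.Set.contains (PySem.Set.ofList an) kw)) all 0]
    cases hf : (PySem.List.enumerate all 0).find?
        (fun p => !(PySem.Set.contains (PySem.Set.ofList an) p.2)) <;> rfl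
  | some c =>
    by_cases hmem : c ∈ all
    · obtain ⟨k, hk⟩ := Option.isSome_iff_exists.mp
        ((PySem.List.index?_isSome_iff all c).mpr hmem)
      have hkidx : all.idxOf c = k := by
        rw [List.idxOf_eq_getD_idxOf?, ← PySem.List.index?_eq_idxOf?, hk]; rfl
      have hlt : k < all.length := hkidx ▸ List.idxOf_lt_length_of_mem hmem
      have hcontains : all.contains c = true := by simpa using hmem
      have hn : 0 < (all.length : Int) := by omega
      have hlen_take : (all.take k).length = k := by
        simp [Nat.min_eq_left (le_of_lt hlt)]
      have hsplit : all = all.take k ++ all[k] :: all.drop (k + 1) := by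
        conv_lhs => rw [← List.take_append_drop k all, List.drop_eq_getElem_cons hlt]
      have henum : PySem.List.enumerate all 0
          = PySem.List.enumerate (all.take k) 0
            ++ ((k : Int), all[k]) :: PySem.List.enumerate (all.drop (k + 1)) ((k : Int) + 1) := by
        conv_lhs => rw [hsplit]
        rw [PySem.List.enumerate_append, hlen_take, PySem.List.enumerate_cons]
        norm_num
      have Hd1 : ∀ j : Int, 0 ≤ j → j < 0 + ((all.take k).length : Int) →
          PySem.Int.mod (j - ((k : Int) + 1)) (all.length : Int)
            = j + ((all.length : Int) - (k : Int) - 1) ∧ (some (k : Int)) ≠ some j := by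
        intro j h1 h2
        rw [hlen_take] at h2
        constructor
        · rw [show j - ((k : Int) + 1) = (j + ((all.length : Int) - (k : Int) - 1)) - (all.length : Int) by ring,
            PySem.Int.mod_eq_emod_of_pos hn, Int.sub_emod_right,
            Int.emod_eq_of_lt (by omega) (by omega)]
        · simp only [ne_eq, Option.some.injEq]
          omega
      have Hd3 : ∀ j : Int, (k : Int) + 1 ≤ j → j < ((k : Int) + 1) + ((all.drop (k + 1)).length : Int) →
          PySem.Int.mod (j - ((k : Int) + 1)) (all.length : Int)
            = j + (-(k : Int) - 1) ∧ (some (k : Int)) ≠ some j := by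
        intro j h1 h2
        rw [List.length_drop] at h2
        constructor
        · rw [PySem.Int.mod_eq_emod_of_pos hn,
            Int.emod_eq_of_lt (by omega) (by omega)]
          ring
        · simp only [ne_eq, Option.some.injEq]
          omega
      have hskip : ∀ acc, bStep (PySem.Set.ofList an) (some (k : Int)) (((k + 1 : Nat) : Int))
          (all.length : Int) acc ((k : Int), all[k]) = acc := by
        intro acc
        have hcond : ¬ ((some (k : Int)) ≠ some ((k : Int), all[k]).1
            ∧ PySem.Set.contains (PySem.Set.ofList an) ((k : Int), all[k]).2 = false) := by
          rintro ⟨h, -⟩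
          exact h rfl
        simp only [bStep, if_neg hcond]
      have hdropfull : (all.drop (k + 1)).take (all.length - (k + 1)) = all.drop (k + 1) :=
        List.take_of_length_le (by simp)
      have h1 := aIdxScan_eq_find? all an (k + 1) all.length (le_refl _)
      rw [hdropfull] at h1
      have h2 := aIdxScan_eq_find? all an 0 k (le_of_lt hlt)
      simp only [List.drop_zero, Nat.sub_zero, Nat.cast_zero] at h2
      have hcast : ((k : Int) + 1) = ((k + 1 : Nat) : Int) := by push_cast; ring
      simp only [get_next_keyword, get_next_keyword_alt, hk, hcontains, if_true, hkidx]
      rw [hcast]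
      rw [h1, h2, henum, List.foldl_append, List.foldl_cons,
        fold_lin (PySem.Set.ofList an) (some (k : Int)) (((k + 1 : Nat) : Int)) (all.length : Int)
          ((all.length : Int) - (k : Int) - 1) (all.take k) 0 none (by rw [← hcast]; exact Hd1),
        hskip,
        fold_lin (PySem.Set.ofList an) (some (k : Int)) (((k + 1 : Nat) : Int)) (all.length : Int)
          (-(k : Int) - 1) (all.drop (k + 1)) ((k : Int) + 1) _ (by rw [← hcast]; exact Hd3),
        ← find?_enumerate_snd (fun kw => !(PySem.Set.contains (PySem.Set.ofList an) kw)) (all.drop (k + 1)) ((k : Int) + 1),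
        ← find?_enumerate_snd (fun kw => !(PySem.Set.contains (PySem.Set.ofList an) kw)) (all.take k) 0]
      cases hf3 : (PySem.List.enumerate (all.drop (k + 1)) ((k : Int) + 1)).find?
          (fun p => !(PySem.Set.contains (PySem.Set.ofList an) p.2)) with
      | none =>
        cases hf1 : (PySem.List.enumerate (all.take k) 0).find?
            (fun p => !(PySem.Set.contains (PySem.Set.ofList an) p.2)) <;> rfl
      | some p3 =>
        have hb3 := find?_enumerate_fst_bounds (all.drop (k + 1)) ((k : Int) + 1) _ p3 hf3
        cases hf1 : (PySem.List.enumerate (all.take k) 0).find?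
            (fun p => !(PySem.Set.contains (PySem.Set.ofList an) p.2)) with
        | none => rfl
        | some p1 =>
          have hb1 := find?_enumerate_fst_bounds (all.take k) 0 _ p1 hf1
          rw [hlen_take] at hb1
          rw [List.length_drop] at hb3
          have hcond : p3.1 + (-(k : Int) - 1) < p1.1 + ((all.length : Int) - (k : Int) - 1) := by
            omega
          simp only [if_pos hcond]
          rfl
    · have hidx : PySem.List.index? all c = none := (PySem.List.index?_eq_none_iff all c).mpr hmem
      have hcontains : all.contains c = false := by simpa using hmem
      simp only [get_next_keyword, get_next_keyword_alt, hidx, hcontains, Bool.false_eq_true,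
        if_false]

-- ===== VERDICT (by name: the statement is the Claim_ definition above) =====
theorem get_next_keyword_spec : Claim_equal_get_next_keyword := by
  intro all an cur _
  unfold Spec_get_next_keyword
  exact get_next_keyword_spec' all an cur
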